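-- pv_equiv track=rewrite | github.com/AlexandrZhydyk/Hillel-Home-Work | HW_lesson18/photos_quantity.py | count_photos
-- ===== SOURCE A (Python) =====
-- def count_photos(road):
--     cameras = road.count(".")
--     passed_cameras = 0
--     photos = 0
--     for item in road:
--         if item == ".":
--             cameras -= 1
--             passed_cameras += 1
--         if item == ">":
--             photos += cameras
--         if item == "<":
--             photos += passed_cameras
--     return photos
-- ===== SOURCE B (Python) =====
-- def count_photos(road):
--     # Attribute each photo to the camera ('.') being photographed:
--     # a camera is photographed once by every '>' to its left and every '<' to its right.
--     total = 0
--     gt = 0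
--     for ch in road:
--         if ch == ".":
--             total += gt
--         elif ch == ">":
--             gt += 1
--     lt = 0
--     for ch in reversed(road):
--         if ch == ".":
--             total += lt
--         elif ch == "<":
--             lt += 1
--     return total
-- ===== Notes on version B (the rewrite author's own statement) =====
-- stated objective: alternative
-- what changed: B counts per camera instead of per arrow: a forward pass adds, at each camera dot, the number of right-facing arrows seen so far, and a backward pass adds the number of left-facing arrows seen so far; the transpose of A's per-arrow counting with its upfront dot count and remaining/passed-camera state.
import Mathlib
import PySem

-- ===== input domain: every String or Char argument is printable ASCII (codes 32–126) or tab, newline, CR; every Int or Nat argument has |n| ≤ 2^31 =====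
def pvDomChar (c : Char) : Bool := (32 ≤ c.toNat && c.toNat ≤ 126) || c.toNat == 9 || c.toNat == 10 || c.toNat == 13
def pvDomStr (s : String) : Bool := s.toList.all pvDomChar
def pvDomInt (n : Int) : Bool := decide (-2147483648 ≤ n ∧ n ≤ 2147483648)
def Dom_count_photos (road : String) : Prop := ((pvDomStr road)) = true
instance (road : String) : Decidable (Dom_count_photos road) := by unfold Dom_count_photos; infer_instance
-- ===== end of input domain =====

-- B counts per camera (forward '>'-prefix counts and backward '<'-suffix counts at each '.')
-- instead of A's per-arrow counting with remaining/passed-camera state: an alternative decomposition.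

-- ===== PORT A =====
def countA_loop : List Char → Int → Int → Int → Int
  | [], _cameras, _passed, photos => photos
  | item :: rest, cameras, passed, photos =>
    let cameras := if item = '.' then cameras - 1 else cameras
    let passed := if item = '.' then passed + 1 else passed
    let photos := if item = '>' then photos + cameras else photos
    let photos := if item = '<' then photos + passed else photos
    countA_loop rest cameras passed photos

def count_photos (road : String) : Int :=
  countA_loop road.toList ((PySem.Str.count road "." : Nat) : Int) 0 0

-- ===== PORT B =====
def fwd_loop : List Char → Int → Int → Int
  | [], _gt, total => total
  | ch :: rest, gt, total =>
    if ch = '.' then fwd_loop rest gt (total + gt)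
    else if ch = '>' then fwd_loop rest (gt + 1) total
    else fwd_loop rest gt total

def bwd_loop : List Char → Int → Int → Int
  | [], _lt, total => total
  | ch :: rest, lt, total =>
    if ch = '.' then bwd_loop rest lt (total + lt)
    else if ch = '<' then bwd_loop rest (lt + 1) total
    else bwd_loop rest lt total

def count_photos_alt (road : String) : Int :=
  bwd_loop road.toList.reverse 0 (fwd_loop road.toList 0 0)

-- ===== PRECONDITION & SPEC =====
def Spec_count_photos (road : String) (out : Int) : Prop := out = count_photos_alt road
instance (road : String) (out : Int) : Decidable (Spec_count_photos road out) := by unfold Spec_count_photos; infer_instance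

-- ===== CLAIM (what is proved, stated in full; the proofs are below) =====
def Claim_equal_count_photos : Prop := ∀ (road : String), Dom_count_photos road → Spec_count_photos road (count_photos road)

-- ===== LEMMAS AND PROOFS =====

-- Int-valued character count, the common currency of both characterisations.
def cnt (c : Char) : List Char → Int
  | [] => 0
  | x :: xs => (if x = c then 1 else 0) + cnt c xs

-- total photos: each '>' photographs the dots after it, each '.' is photographed by the '<'s after it
def T : List Char → Int
  | [] => 0
  | x :: xs => (if x = '>' then cnt '.' xs else 0) + (if x = '.' then cnt '<' xs else 0) + T xs

def Tf : List Char → Int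
  | [] => 0
  | x :: xs => (if x = '>' then cnt '.' xs else 0) + Tf xs

def Tb : List Char → Int
  | [] => 0
  | x :: xs => (if x = '<' then cnt '.' xs else 0) + Tb xs

theorem cnt_append (c : Char) (a b : List Char) : cnt c (a ++ b) = cnt c a + cnt c b := by
  induction a with
  | nil => simp [cnt]
  | cons x xs ih => simp [cnt, ih]; ring

theorem cnt_reverse (c : Char) (l : List Char) : cnt c l.reverse = cnt c l := by
  induction l with
  | nil => rfl
  | cons x xs ih => simp [cnt, List.reverse_cons, cnt_append, ih]; ring

theorem cnt_eq_count (c : Char) (l : List Char) : cnt c l = (l.count c : Int) := by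
  induction l with
  | nil => simp [cnt]
  | cons x xs ih =>
    simp only [cnt, List.count_cons, ih, beq_iff_eq]
    split_ifs <;> push_cast <;> ring

theorem go_singleton (ch : Char) (fuel : Nat) :
    ∀ (l : List Char) (acc : Nat), l.length ≤ fuel →
      PySem.Chars.count.go [ch] fuel l acc = acc + l.count ch := by
  induction fuel with
  | zero =>
    intro l acc h
    have hl : l = [] := List.length_eq_zero_iff.mp (Nat.le_zero.mp h)
    subst hl
    simp [PySem.Chars.count.go]
  | succ n ih =>
    intro l acc h
    cases l with
    | nil => simp [PySem.Chars.count.go]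
    | cons x t =>
      simp only [PySem.Chars.count.go, List.isPrefixOf, List.length_cons] at *
      by_cases hx : ch = x
      · subst hx
        simp only [beq_self_eq_true, Bool.true_and, if_true,
          List.length_nil, List.drop_succ_cons, List.drop_zero]
        rw [ih t (acc + 1) (by omega)]
        simp
        omega
      · have hbx : (ch == x) = false := by simp [hx]
        have hbx' : (x == ch) = false := by
          simp only [beq_eq_false_iff_ne, ne_eq]
          exact fun he => hx he.symm
        simp only [hbx, Bool.false_and]
        rw [ih t acc (by omega)]
        simp [List.count_cons, hbx']

theorem count_singleton (l : List Char) (ch : Char) :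
    PySem.Chars.count l [ch] = l.count ch := by
  simp only [PySem.Chars.count, List.isEmpty_cons, Bool.false_eq_true, if_false]
  rw [go_singleton ch l.length l 0 le_rfl, Nat.zero_add]

theorem countA_eq (l : List Char) :
    ∀ c p ph, countA_loop l c p ph =
      ph + T l + (c - cnt '.' l) * cnt '>' l + p * cnt '<' l := by
  induction l with
  | nil => intro c p ph; simp [countA_loop, T, cnt]
  | cons x xs ih =>
    intro c p ph
    simp only [countA_loop]
    rw [ih]
    by_cases hd : x = '.'
    · subst hd; simp [T, cnt]; try ring
    · by_cases hg : x = '>'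
      · subst hg; simp [T, cnt]; try ring
      · by_cases hl : x = '<'
        · subst hl; simp [T, cnt]; try ring
        · simp [T, cnt, hd, hg, hl]; try ring

theorem fwd_eq (l : List Char) :
    ∀ g t, fwd_loop l g t = t + g * cnt '.' l + Tf l := by
  induction l with
  | nil => intro g t; simp [fwd_loop, cnt, Tf]
  | cons x xs ih =>
    intro g t
    simp only [fwd_loop]
    by_cases hd : x = '.'
    · subst hd; rw [if_pos rfl, ih]; simp [cnt, Tf]; ring
    · by_cases hg : x = '>'
      · subst hg; rw [if_neg (by decide), if_pos rfl, ih]; simp [cnt, Tf]; ring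
      · rw [if_neg hd, if_neg hg, ih]; simp [cnt, Tf, hd, hg]

theorem bwd_eq (l : List Char) :
    ∀ g t, bwd_loop l g t = t + g * cnt '.' l + Tb l := by
  induction l with
  | nil => intro g t; simp [bwd_loop, cnt, Tb]
  | cons x xs ih =>
    intro g t
    simp only [bwd_loop]
    by_cases hd : x = '.'
    · subst hd; rw [if_pos rfl, ih]; simp [cnt, Tb]; ring
    · by_cases hl : x = '<'
      · subst hl; rw [if_neg (by decide), if_pos rfl, ih]; simp [cnt, Tb]; ring
      · rw [if_neg hd, if_neg hl, ih]; simp [cnt, Tb, hd, hl]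

theorem Tb_append (m : List Char) (x : Char) :
    Tb (m ++ [x]) = Tb m + (if x = '.' then cnt '<' m else 0) := by
  induction m with
  | nil => simp [Tb, cnt]
  | cons y ys ih =>
    simp only [List.cons_append, Tb, ih, cnt_append]
    by_cases hy : y = '<'
    · subst hy
      by_cases hx : x = '.'
      · subst hx; simp [cnt]; try ring
      · simp [hx, cnt]
    · by_cases hx : x = '.'
      · subst hx; simp [hy, cnt]; try ring
      · simp [hy, hx]

theorem T_split (l : List Char) : T l = Tf l + Tb l.reverse := by
  induction l with
  | nil => rfl
  | cons x xs ih =>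
    simp only [T, Tf, List.reverse_cons, Tb_append, cnt_reverse, ih]
    ring

-- ===== VERDICT (by name: the statement is the Claim_ definition above) =====
theorem count_photos_spec : Claim_equal_count_photos := by
  intro road _
  unfold Spec_count_photos count_photos count_photos_alt
  have hc : ((PySem.Str.count road "." : Nat) : Int) = cnt '.' road.toList := by
    rw [PySem.Str.count_eq]
    have : (".".toList : List Char) = ['.'] := rfl
    rw [this, count_singleton, cnt_eq_count]
  rw [countA_eq, fwd_eq, bwd_eq, hc, T_split road.toList, cnt_reverse]
  ring
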